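-- pv_equiv track=rewrite | github.com/gesad-science/SCRIBE-CREW | logs/utils.py | normalize_multiline_patterns
-- ===== SOURCE A (Python) =====
-- def normalize_multiline_patterns(lines: list[str], patterns: list[str]) -> list[str]:
--     tokenized_patterns = [
--         pattern.split()
--         for pattern in patterns
--     ]
--
--     i = 0
--     out = []
--
--     while i < len(lines):
--         matched = False
--
--         for tokens in tokenized_patterns:
--             n = len(tokens)
--
--             if i + n > len(lines):
--                 continue
--
--             window = [lines[i + j].strip() for j in range(n)]
--
--             if all(
--                 window[j].lower() == tokens[j].lower()
--                 for j in range(n)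
--             ):
--                 out.append(" ".join(tokens))
--                 i += n
--                 matched = True
--                 break
--
--         if not matched:
--             out.append(lines[i])
--             i += 1
--
--     return out
-- ===== SOURCE B (Python) =====
-- def normalize_multiline_patterns(lines: list[str], patterns: list[str]) -> list[str]:
--     toks = [p.split() for p in patterns]
--     low = [[t.lower() for t in ts] for ts in toks]
--     # index pattern ids by their (lowercased) first token; token-less patterns can never
--     # consume a line, so they are not indexed
--     index = {}
--     for k, lt in enumerate(low):
--         if lt:
--             index.setdefault(lt[0], []).append(k)
--     sl = [ln.strip().lower() for ln in lines]
--     out = []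
--     i = 0
--     L = len(lines)
--     while i < L:
--         step = 0
--         for k in index.get(sl[i], []):
--             lt = low[k]
--             if sl[i:i + len(lt)] == lt:
--                 out.append(" ".join(toks[k]))
--                 step = len(lt)
--                 break
--         if step == 0:
--             out.append(lines[i])
--             step = 1
--         i += step
--     return out
-- ===== Notes on version B (the rewrite author's own statement) =====
-- stated objective: faster
-- what changed: B precomputes stripped-lowercased lines and lowercased token lists once and builds a dict from first token to pattern ids, so at each line only the patterns whose first token equals that line are slice-compared, instead of re-stripping/lowering a window for every pattern at every position.
-- outside the precondition, e.g. on normalize_multiline_patterns(['a'], ['a', '']): A returns ['a'], B returns ['a']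
import Mathlib
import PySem

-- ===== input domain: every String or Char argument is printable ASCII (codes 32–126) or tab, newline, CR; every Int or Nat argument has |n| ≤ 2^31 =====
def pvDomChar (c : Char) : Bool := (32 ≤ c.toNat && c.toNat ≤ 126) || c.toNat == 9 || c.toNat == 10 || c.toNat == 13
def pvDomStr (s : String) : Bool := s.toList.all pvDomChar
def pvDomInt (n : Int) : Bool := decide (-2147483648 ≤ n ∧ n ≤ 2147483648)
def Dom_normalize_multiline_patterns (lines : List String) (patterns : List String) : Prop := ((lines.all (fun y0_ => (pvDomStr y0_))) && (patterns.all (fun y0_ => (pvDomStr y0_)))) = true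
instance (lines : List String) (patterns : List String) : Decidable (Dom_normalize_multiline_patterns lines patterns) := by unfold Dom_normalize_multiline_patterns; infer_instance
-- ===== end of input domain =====

-- B replaces A's try-every-pattern-at-every-line scan by a one-time dict index from first token
-- to pattern ids over precomputed stripped-lowercased lines (objective: faster).

-- ===== PORT A =====
def nmpA_window (lines : List String) (i : Nat) (n : Nat) : List String :=
  (PySem.List.pyRange 0 (n : Int) 1).map
    (fun j => PySem.Str.strip (PySem.List.pyGetD lines ((i : Int) + j) ""))

def nmpA_inner (lines : List String) (i : Nat) : List (List String) → Option (List String)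
  | [] => none
  | tokens :: rest =>
      let n := tokens.length
      if lines.length < i + n then nmpA_inner lines i rest
      else
        let window := nmpA_window lines i n
        if (PySem.List.pyRange 0 (n : Int) 1).all (fun j =>
              PySem.Str.lower (PySem.List.pyGetD window j "") ==
              PySem.Str.lower (PySem.List.pyGetD tokens j ""))
        then some tokens
        else nmpA_inner lines i rest

def nmpA_loop (lines : List String) (tp : List (List String)) :
    Nat → Nat → List String → List String
  | 0, _, out => out
  | fuel + 1, i, out =>
      if i < lines.length then
        match nmpA_inner lines i tp with
        | some tokens =>
            nmpA_loop lines tp fuel (i + tokens.length) (out ++ [PySem.Str.join " " tokens])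
        | none =>
            nmpA_loop lines tp fuel (i + 1) (out ++ [PySem.List.pyGetD lines (i : Int) ""])
      else out

-- fuel lines.length is enough: under Pre_ every iteration of A's while loop advances i by ≥ 1
def normalize_multiline_patterns (lines : List String) (patterns : List String) : List String :=
  nmpA_loop lines (patterns.map PySem.Str.split₀) lines.length 0 []

-- ===== PORT B =====
def nmpB_scan (sl : List String) (low : List (List String)) (i : Nat) :
    List Int → Option Int
  | [] => none
  | k :: rest =>
      let lt := PySem.List.pyGetD low k []
      if PySem.List.slice sl (some (i : Int)) (some ((i : Int) + (lt.length : Int))) == lt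
      then some k
      else nmpB_scan sl low i rest

def nmpB_loop (lines : List String) (toks low : List (List String))
    (index : PySem.Dict String (List Int)) (sl : List String) :
    Nat → Nat → List String → List String
  | 0, _, out => out
  | fuel + 1, i, out =>
      if i < lines.length then
        match nmpB_scan sl low i (index.getD (PySem.List.pyGetD sl (i : Int) "") []) with
        | some k =>
            nmpB_loop lines toks low index sl fuel (i + (PySem.List.pyGetD low k []).length)
              (out ++ [PySem.Str.join " " (PySem.List.pyGetD toks k [])])
        | none =>
            nmpB_loop lines toks low index sl fuel (i + 1)
              (out ++ [PySem.List.pyGetD lines (i : Int) ""])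
      else out

def normalize_multiline_patterns_alt (lines : List String) (patterns : List String) : List String :=
  let toks := patterns.map PySem.Str.split₀
  let low := toks.map (fun ts => ts.map PySem.Str.lower)
  let index := (PySem.List.enumerate low 0).foldl
      (fun d p => match p.2 with
        | [] => d
        | h :: _ => d.modify h [] (· ++ [p.1]))
      PySem.Dict.empty
  let sl := lines.map (fun l => PySem.Str.lower (PySem.Str.strip l))
  nmpB_loop lines toks low index sl lines.length 0 []

-- ===== PRECONDITION & SPEC =====
-- Pre_ excludes pattern lists containing a token-less (empty/whitespace-only) pattern when
-- lines is nonempty: such a pattern matches vacuously and advances i by 0, so A loops forever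
-- whenever it is ever consulted; on the few such inputs where an earlier pattern always matches
-- first A does return, and B agrees there (see cites), but that cannot be told apart in closed form.
def Pre_normalize_multiline_patterns (lines : List String) (patterns : List String) : Prop :=
  lines = [] ∨ ∀ p ∈ patterns, PySem.Str.split₀ p ≠ []
instance (lines : List String) (patterns : List String) :
    Decidable (Pre_normalize_multiline_patterns lines patterns) := by
  unfold Pre_normalize_multiline_patterns; infer_instance

def pvWitness_normalize_multiline_patterns : List String × List String :=
  (["Hello", "world"], ["hello world"])

def Spec_normalize_multiline_patterns (lines : List String) (patterns : List String)
    (out : List String) : Prop := out = normalize_multiline_patterns_alt lines patterns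
instance (lines : List String) (patterns : List String) (out : List String) :
    Decidable (Spec_normalize_multiline_patterns lines patterns out) := by
  unfold Spec_normalize_multiline_patterns; infer_instance

-- ===== CLAIM (what is proved, stated in full; the proofs are below) =====
def Claim_equal_normalize_multiline_patterns : Prop := ∀ (lines : List String) (patterns : List String), Dom_normalize_multiline_patterns lines patterns → Pre_normalize_multiline_patterns lines patterns → Spec_normalize_multiline_patterns lines patterns (normalize_multiline_patterns lines patterns)

-- ===== LEMMAS AND PROOFS =====

-- abbreviations for the proof (not used by the ports)
def nmpLower (ts : List String) : List String := ts.map PySem.Str.lower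
def nmpSl (lines : List String) : List String :=
  lines.map (fun l => PySem.Str.lower (PySem.Str.strip l))
def nmpCond (sl : List String) (i : Nat) (lt : List String) : Bool :=
  PySem.List.slice sl (some (i : Int)) (some ((i : Int) + (lt.length : Int))) == lt
def nmpHeadEq (p : Int × List String) (c : String) : Bool :=
  match p.2 with
  | [] => false
  | h :: _ => h == c

-- general find? helpers specific to this proof
theorem nmp_find?_congr_mem {α : Type} (l : List α) (p q : α → Bool)
    (h : ∀ x ∈ l, p x = q x) : l.find? p = l.find? q := by
  induction l with
  | nil => rfl
  | cons x l ih =>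
      simp only [List.find?_cons]
      rw [h x (by simp)]
      cases hq : q x
      · exact ih (fun y hy => h y (by simp [hy]))
      · rfl

theorem nmp_find?_filter_of_imp {α : Type} (l : List α) (p q : α → Bool)
    (h : ∀ x ∈ l, p x = true → q x = true) : (l.filter q).find? p = l.find? p := by
  induction l with
  | nil => rfl
  | cons x l ih =>
      by_cases hq : q x = true
      · simp [hq, List.find?_cons,
          ih (fun y hy hp => h y (by simp [hy]) hp)]
      · have hp : p x = false := by
          cases hpx : p x
          · rfl
          · exact absurd (h x (by simp) hpx) hq
        simp [hq, hp,
          ih (fun y hy hp => h y (by simp [hy]) hp)]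

theorem nmp_enumerate_map {α β : Type} (f : α → β) (l : List α) (s : Int) :
    PySem.List.enumerate (l.map f) s =
      (PySem.List.enumerate l s).map (fun p => (p.1, f p.2)) := by
  induction l generalizing s with
  | nil => simp [PySem.List.enumerate_nil]
  | cons x l ih => simp [PySem.List.enumerate_cons, ih]

-- A's per-pattern test, out-of-range case
theorem nmpE1 (lines : List String) (i : Nat) (t : List String)
    (hi : i < lines.length) (hn : lines.length < i + t.length) :
    nmpCond (nmpSl lines) i (nmpLower t) = false := by
  unfold nmpCond
  rw [beq_eq_false_iff_ne]
  intro heq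
  have hl := congrArg List.length heq
  rw [PySem.List.length_slice] at hl
  have hcast : (i : Int) + ((nmpLower t).length : Int) = ((i + t.length : Nat) : Int) := by
    simp [nmpLower]
  rw [hcast] at hl
  simp only [PySem.List.clampIdx_natCast, nmpLower, List.length_map, nmpSl] at hl
  omega

-- A's per-pattern test, in-range case
theorem nmpE2 (lines : List String) (i : Nat) (t : List String)
    (hi : i < lines.length) (hn : i + t.length ≤ lines.length) :
    ((PySem.List.pyRange 0 (t.length : Int) 1).all (fun j =>
        PySem.Str.lower (PySem.List.pyGetD (nmpA_window lines i t.length) j "") ==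
        PySem.Str.lower (PySem.List.pyGetD t j ""))) =
      nmpCond (nmpSl lines) i (nmpLower t) := by
  have hlen : (nmpSl lines).length = lines.length := by simp [nmpSl]
  have hwin : ∀ j' : Nat, (hj' : j' < t.length) →
      PySem.List.pyGetD (nmpA_window lines i t.length) ((j' : Int)) "" =
        PySem.Str.strip (lines[i + j']'(by omega)) := by
    intro j' hj'
    unfold nmpA_window
    rw [PySem.List.pyGetD_map_pyRange_of_nonneg _ _ _ _ (by positivity) (by exact_mod_cast hj')]
    have hc : (i : Int) + (j' : Int) = ((i + j' : Nat) : Int) := by push_cast; ring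
    rw [hc, PySem.List.pyGetD_natCast]
    rw [List.getD_eq_getElem _ _ (by omega)]
  have ht : ∀ j' : Nat, (hj' : j' < t.length) →
      PySem.List.pyGetD t ((j' : Int)) "" = t[j']'(by omega) := by
    intro j' hj'
    rw [PySem.List.pyGetD_natCast, List.getD_eq_getElem _ _ hj']
  rw [Bool.eq_iff_iff]
  unfold nmpCond
  simp only [List.all_eq_true, PySem.List.mem_pyRange_one, beq_iff_eq]
  have hcast : (i : Int) + ((nmpLower t).length : Int) = (i : Int) + (t.length : Int) := by
    simp [nmpLower]
  rw [hcast, PySem.List.slice_natCast_add]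
  constructor
  · intro hall
    apply List.ext_getElem
    · simp [nmpLower, hlen]; omega
    · intro j hj1 hj2
      have hjn : j < t.length := by simpa [nmpLower] using hj2
      have h1 := hall (j : Int) ⟨by positivity, by exact_mod_cast hjn⟩
      rw [hwin j hjn, ht j hjn] at h1
      simp only [List.getElem_take, List.getElem_drop, nmpLower, List.getElem_map, nmpSl]
      simpa [nmpSl] using h1
  · intro heq x hx
    obtain ⟨hx0, hx1⟩ := hx
    have hjn : x.toNat < t.length := by omega
    have hxx : x = ((x.toNat : Nat) : Int) := by omega
    rw [hxx, hwin x.toNat hjn, ht x.toNat hjn]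
    have h1 := List.getElem_of_eq heq (show x.toNat < (((nmpSl lines).drop i).take t.length).length by
      simp [hlen]; omega)
    simp only [List.getElem_take, List.getElem_drop, nmpLower, List.getElem_map, nmpSl] at h1
    simpa [nmpSl] using h1

-- A's inner for-loop is a find? over the token lists
theorem nmpL1 (lines : List String) (i : Nat) (hi : i < lines.length)
    (ts : List (List String)) :
    nmpA_inner lines i ts = ts.find? (fun t => nmpCond (nmpSl lines) i (nmpLower t)) := by
  induction ts with
  | nil => rfl
  | cons t rest ih =>
      simp only [nmpA_inner, List.find?_cons]
      by_cases hn : lines.length < i + t.length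
      · rw [if_pos hn, nmpE1 lines i t hi hn, ih]
      · rw [if_neg hn, nmpE2 lines i t hi (by omega)]
        cases hc : nmpCond (nmpSl lines) i (nmpLower t)
        · simp [ih]
        · simp

-- B's for-loop over the bucket is a find?
theorem nmpL2 (sl : List String) (low : List (List String)) (i : Nat) (ks : List Int) :
    nmpB_scan sl low i ks =
      ks.find? (fun k => nmpCond sl i (PySem.List.pyGetD low k [])) := by
  induction ks with
  | nil => rfl
  | cons k rest ih =>
      simp only [nmpB_scan, nmpCond, List.find?_cons]
      cases h : (PySem.List.slice sl (some (i : Int))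
          (some ((i : Int) + ((PySem.List.pyGetD low k []).length : Int))) ==
        PySem.List.pyGetD low k [])
      · simpa [h] using ih
      · simp

-- the dict built by the index loop
theorem nmpL3 (l : List (Int × List String)) (d : PySem.Dict String (List Int)) (c : String) :
    (l.foldl (fun d p => match p.2 with
        | [] => d
        | h :: _ => d.modify h [] (· ++ [p.1])) d).getD c [] =
      d.getD c [] ++ (l.filter (fun p => nmpHeadEq p c)).map (·.1) := by
  induction l generalizing d with
  | nil => simp
  | cons p l ih =>
      rcases p with ⟨k, lt⟩
      cases lt with
      | nil => simp [List.foldl_cons, nmpHeadEq, ih]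
      | cons h tl =>
          by_cases hc : h = c
          · subst hc
            simp [List.foldl_cons, nmpHeadEq, ih,
              PySem.Dict.getD_modify_self]
          · have hne : (PySem.Dict.modify d h [] (· ++ [k])).getD c [] = d.getD c [] :=
              PySem.Dict.getD_modify_of_ne d [] (· ++ [k]) (by simpa using Ne.symm hc)
            simp [List.foldl_cons, nmpHeadEq, ih, hc, hne]

-- the key per-position lemma: both inner scans are the same find? over the enumerated patterns
theorem nmpKey (lines : List String) (tp : List (List String)) (i : Nat)
    (hi : i < lines.length) (hne : ∀ t ∈ tp, t ≠ []) :
    nmpB_scan (nmpSl lines) (tp.map nmpLower) i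
        (((PySem.List.enumerate (tp.map nmpLower) 0).foldl
            (fun d p => match p.2 with
              | [] => d
              | h :: _ => d.modify h [] (· ++ [p.1])) PySem.Dict.empty).getD
          (PySem.List.pyGetD (nmpSl lines) (i : Int) "") []) =
      ((PySem.List.enumerate tp 0).find?
          (fun p => nmpCond (nmpSl lines) i (nmpLower p.2))).map (·.1) ∧
    nmpA_inner lines i tp =
      ((PySem.List.enumerate tp 0).find?
          (fun p => nmpCond (nmpSl lines) i (nmpLower p.2))).map (·.2) := by
  have hlen : (nmpSl lines).length = lines.length := by simp [nmpSl]
  have hmemE : ∀ p ∈ PySem.List.enumerate (tp.map nmpLower) 0,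
      ∃ k : Nat, ∃ hk : k < tp.length, p = ((k : Int), nmpLower (tp[k]'hk)) := by
    intro p hp
    rcases (PySem.List.mem_enumerate_iff _ _ _).mp hp with ⟨k, hk, rfl⟩
    exact ⟨k, by simpa using hk, by simp⟩
  constructor
  · -- B side
    rw [nmpL2, nmpL3, PySem.Dict.getD_empty, List.nil_append, List.find?_map]
    have hagree : ∀ p ∈ (PySem.List.enumerate (tp.map nmpLower) 0).filter
        (fun p => nmpHeadEq p (PySem.List.pyGetD (nmpSl lines) (i : Int) "")),
        ((fun k => nmpCond (nmpSl lines) i (PySem.List.pyGetD (tp.map nmpLower) k [])) ∘ (·.1)) p =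
          (fun p => nmpCond (nmpSl lines) i p.2) p := by
      intro p hp
      rcases hmemE p (List.mem_of_mem_filter hp) with ⟨k, hk, rfl⟩
      have hg : PySem.List.pyGetD (tp.map nmpLower) ((k : Int)) [] = nmpLower (tp[k]'hk) := by
        rw [PySem.List.pyGetD_natCast, List.getD_eq_getElem _ _ (by simpa using hk)]
        simp
      simp only [Function.comp_apply, hg]
    rw [nmp_find?_congr_mem _ _ _ hagree]
    have himp : ∀ p ∈ PySem.List.enumerate (tp.map nmpLower) 0,
        (fun p => nmpCond (nmpSl lines) i p.2) p = true →
        (fun p => nmpHeadEq p (PySem.List.pyGetD (nmpSl lines) (i : Int) "")) p = true := by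
      intro p hp hcond
      rcases hmemE p hp with ⟨k, hk, rfl⟩
      have hne' : tp[k]'hk ≠ [] := hne _ (List.getElem_mem hk)
      rcases hlt : nmpLower (tp[k]'hk) with _ | ⟨h, rest⟩
      · exact absurd (by simpa [nmpLower, List.length_eq_zero_iff] using congrArg List.length hlt) hne'
      · simp only at hcond
        unfold nmpCond at hcond
        rw [beq_iff_eq, PySem.List.slice_natCast_add, hlt] at hcond
        have h0len : 0 < (((nmpSl lines).drop i).take (h :: rest).length).length := by
          rw [hcond]; simp
        have h0 := List.getElem_of_eq hcond (i := 0) h0len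
        simp only [List.getElem_take, List.getElem_drop, List.getElem_cons_zero] at h0
        have hci : PySem.List.pyGetD (nmpSl lines) ((i : Int)) "" = (nmpSl lines)[i + 0]'(by omega) := by
          rw [PySem.List.pyGetD_natCast, List.getD_eq_getElem _ _ (by omega)]
          simp
        simp [nmpHeadEq, hci, ← h0]
    rw [nmp_find?_filter_of_imp _ _ _ himp]
    rw [nmp_enumerate_map, List.find?_map, Option.map_map]
    rfl
  · -- A side
    rw [nmpL1 lines i hi tp]
    conv_lhs => rw [← PySem.List.map_snd_enumerate tp 0]
    rw [List.find?_map]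
    rfl

-- the two while loops agree step by step
theorem nmpLoop (lines : List String) (tp : List (List String))
    (hne : ∀ t ∈ tp, t ≠ []) (fuel i : Nat) (out : List String) :
    nmpA_loop lines tp fuel i out =
      nmpB_loop lines tp (tp.map nmpLower)
        ((PySem.List.enumerate (tp.map nmpLower) 0).foldl
          (fun d p => match p.2 with
            | [] => d
            | h :: _ => d.modify h [] (· ++ [p.1])) PySem.Dict.empty)
        (nmpSl lines) fuel i out := by
  induction fuel generalizing i out with
  | zero => rfl
  | succ fuel ih =>
      simp only [nmpA_loop, nmpB_loop]
      by_cases hi : i < lines.length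
      · rw [if_pos hi, if_pos hi]
        obtain ⟨hB, hA⟩ := nmpKey lines tp i hi hne
        rw [hA, hB]
        cases hF : (PySem.List.enumerate tp 0).find?
            (fun p => nmpCond (nmpSl lines) i (nmpLower p.2)) with
        | none =>
            simp only [Option.map_none]
            exact ih _ _
        | some q =>
            rcases q with ⟨kk, t⟩
            have hmem := List.mem_of_find?_eq_some hF
            rcases (PySem.List.mem_enumerate_iff _ _ _).mp hmem with ⟨k, hk, heq⟩
            have hkk : kk = (k : Int) := by simpa using congrArg Prod.fst heq
            have ht : t = tp[k]'hk := by simpa using congrArg Prod.snd heq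
            have hg2 : PySem.List.pyGetD tp kk [] = t := by
              rw [hkk, PySem.List.pyGetD_natCast, List.getD_eq_getElem _ _ hk, ht]
            have hg1 : PySem.List.pyGetD (tp.map nmpLower) kk [] = nmpLower t := by
              rw [hkk, PySem.List.pyGetD_natCast, List.getD_eq_getElem _ _ (by simpa using hk)]
              simp [ht]
            have hlt : (nmpLower t).length = t.length := by simp [nmpLower]
            simp only [Option.map_some, hg1, hg2, hlt]
            exact ih _ _
      · rw [if_neg hi, if_neg hi]

-- ===== VERDICT (by name: the statement is the Claim_ definition above) =====
theorem normalize_multiline_patterns_spec : Claim_equal_normalize_multiline_patterns := by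
  intro lines patterns _ hpre
  unfold Spec_normalize_multiline_patterns normalize_multiline_patterns
    normalize_multiline_patterns_alt
  rcases hpre with h | h
  · subst h; rfl
  · have h2 := (nmpLoop lines (patterns.map PySem.Str.split₀)
      (by intro t ht; rcases List.mem_map.mp ht with ⟨p, hp, rfl⟩; exact h p hp)
      lines.length 0 [])
    simpa [nmpLower, nmpSl] using h2
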